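-- pv_equiv track=rewrite | github.com/Kaimary/CycleSQL | src/utils.py | break_down_query
-- ===== SOURCE A (Python) =====
-- from enum import IntEnum
--
-- SQL_OPS = ('intersect', 'union', 'except')
--
-- class Query_type(IntEnum):
--     MAIN = 0
--     INTERSECT = 1
--     UNION = 2
--     EXCEPT = 3
--
-- def break_down_query(
--     sql: str
-- ) -> list:
--     """
--     Break down a complex SQL query into small pieces (simple queries)
--
--     Args:
--         sql: A complex sql string
--
--     Return:
--         A tuple list where first element is a sql string and the second one is corresponding query type (i.e., main/intersect/except/union)
--
--     #TODO support multiple intersects/excepts/unions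
--     """
--     split_indice = []
--     toks = sql.strip(';').split()
--     left_brackets = 0
--     for idx, t in enumerate(toks):
--         if '(' in t: left_brackets += 1
--         if ')' in t: left_brackets -= 1
--         if any(tt in t.lower() for tt in SQL_OPS) and left_brackets == 0: split_indice.append(idx)
--     split_indice.append(len(toks))
--
--     start = split_indice[0]
--     sqls: list(tuple) = []
--     main_sql = ' '.join(toks[: split_indice[0]])
--     sqls.append((main_sql, Query_type.MAIN))
--     # Finally add IUE-type SQLs
--     for i in split_indice[1:]:
--         type = toks[start].strip().upper()
--         s = ' '.join(toks[start+1: i])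
--         # if Query_type[type] == Query_type.EXCEPT:
--         #     sqls.insert(0, (s, Query_type.EXCEPT))  # For `except`, we put in font of `main` SQL for explaining purpose.
--         sqls.append((s, Query_type[type]))
--         start = i
--
--     return sqls
-- ===== SOURCE B (Python) =====
-- from enum import IntEnum
--
-- SQL_OPS = ('intersect', 'union', 'except')
--
-- class Query_type(IntEnum):
--     MAIN = 0
--     INTERSECT = 1
--     UNION = 2
--     EXCEPT = 3
--
-- def break_down_query(
--     sql: str
-- ) -> list:
--     """Single streaming pass: buffer tokens, emit (segment, type) whenever a
--     top-level IUE keyword token is seen, instead of collecting split indices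
--     and re-slicing."""
--     sqls = []
--     buf = []
--     cur = Query_type.MAIN
--     depth = 0
--     for t in sql.strip(';').split():
--         if '(' in t: depth += 1
--         if ')' in t: depth -= 1
--         if depth == 0 and any(op in t.lower() for op in SQL_OPS):
--             sqls.append((' '.join(buf), cur))
--             cur = Query_type[t.upper()]
--             buf = []
--         else:
--             buf.append(t)
--     sqls.append((' '.join(buf), cur))
--     return sqls
-- ===== Notes on version B (the rewrite author's own statement) =====
-- stated objective: simpler
-- what changed: B replaces A's two-phase design (collect split indices into a list, then re-slice the token list between consecutive indices) with a single streaming pass that keeps a token buffer and the current query type and emits each (segment, type) pair directly when a top-level IUE keyword token is reached.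
import Mathlib
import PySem

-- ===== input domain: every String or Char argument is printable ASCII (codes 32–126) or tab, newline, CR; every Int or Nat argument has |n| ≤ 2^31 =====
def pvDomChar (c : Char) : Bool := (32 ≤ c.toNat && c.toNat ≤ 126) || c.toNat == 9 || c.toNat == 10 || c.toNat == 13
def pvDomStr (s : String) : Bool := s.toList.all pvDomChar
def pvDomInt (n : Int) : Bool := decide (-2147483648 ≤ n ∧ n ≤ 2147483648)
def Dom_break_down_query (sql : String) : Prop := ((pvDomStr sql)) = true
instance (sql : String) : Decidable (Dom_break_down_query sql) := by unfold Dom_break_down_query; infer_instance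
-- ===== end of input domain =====

-- B replaces A's two-phase design (collect split indices, then re-slice between them) with one
-- streaming pass keeping a token buffer and the current query type (objective: simpler).

-- shared module context: the SQL_OPS keyword test, the '('/')' depth update, and Query_type[s]
-- (on a key not in the enum Python raises KeyError — excluded by Pre_; the default 0 is unreachable there)
def pvKw (t : String) : Bool :=
  PySem.Str.isIn "intersect" (PySem.Str.lower t) || PySem.Str.isIn "union" (PySem.Str.lower t) ||
    PySem.Str.isIn "except" (PySem.Str.lower t)

def pvStep (d : Int) (t : String) : Int :=
  let d1 := if PySem.Str.isIn "(" t then d + 1 else d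
  if PySem.Str.isIn ")" t then d1 - 1 else d1

def pvQtype (s : String) : Int :=
  if s = "MAIN" then 0 else if s = "INTERSECT" then 1
  else if s = "UNION" then 2 else if s = "EXCEPT" then 3 else 0

-- ===== PORT A =====
def break_down_query (sql : String) : List (String × Int) :=
  let toks := PySem.Str.split₀ (PySem.Str.stripChars sql ";")
  -- phase 1: for idx, t in enumerate(toks): update left_brackets, collect split_indice
  let p1 := (PySem.List.enumerate toks 0).foldl
    (fun (st : List Int × Int) (it : Int × String) =>
      let lb := pvStep st.2 it.2
      (if pvKw it.2 && lb == 0 then st.1 ++ [it.1] else st.1, lb)) ([], 0)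
  let split_indice := p1.1 ++ [(toks.length : Int)]
  let start := (PySem.List.pyGet? split_indice 0).getD 0   -- split_indice[0]; the list is never empty
  let main_sql := PySem.Str.join " " (PySem.List.slice toks none (some start))
  -- phase 2: for i in split_indice[1:]: emit (join(toks[start+1:i]), Query_type[toks[start].strip().upper()])
  let p2 := (PySem.List.slice split_indice (some 1) none).foldl
    (fun (st : List (String × Int) × Int) (i : Int) =>
      let ty := PySem.Str.upper (PySem.Str.strip ((PySem.List.pyGet? toks st.2).getD ""))
      let s := PySem.Str.join " " (PySem.List.slice toks (some (st.2 + 1)) (some i))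
      (st.1 ++ [(s, pvQtype ty)], i)) ([(main_sql, (0 : Int))], start)
  p2.1

-- ===== PORT B =====
def pvAltGo : List String → List (String × Int) → List String → Int → Int → List (String × Int)
  | [], sqls, buf, cur, _ => sqls ++ [(PySem.Str.join " " buf, cur)]
  | t :: rest, sqls, buf, cur, depth =>
    let d := pvStep depth t
    if d == 0 && pvKw t then
      pvAltGo rest (sqls ++ [(PySem.Str.join " " buf, cur)]) [] (pvQtype (PySem.Str.upper t)) d
    else
      pvAltGo rest sqls (buf ++ [t]) cur d

def break_down_query_alt (sql : String) : List (String × Int) :=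
  pvAltGo (PySem.Str.split₀ (PySem.Str.stripChars sql ";")) [] [] 0 0

-- ===== PRECONDITION & SPEC =====
-- the top-level keyword tokens: tokens containing an SQL_OPS substring at bracket depth 0
def pvTopKw : List String → Int → List String
  | [], _ => []
  | t :: r, d =>
    let d' := pvStep d t
    (if pvKw t && d' == 0 then [t] else []) ++ pvTopKw r d'

-- Pre_ excludes exactly the inputs on which Python A raises KeyError: some top-level token merely
-- CONTAINS a keyword substring without being literally INTERSECT/UNION/EXCEPT (the strip t = t
-- conjunct holds automatically for tokens produced by str.split()).
def Pre_break_down_query (sql : String) : Prop :=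
  ∀ t ∈ pvTopKw (PySem.Str.split₀ (PySem.Str.stripChars sql ";")) 0,
    PySem.Str.strip t = t ∧
      PySem.Str.upper t ∈ (["INTERSECT", "UNION", "EXCEPT"] : List String)
instance (sql : String) : Decidable (Pre_break_down_query sql) := by
  unfold Pre_break_down_query; infer_instance

def pvWitness_break_down_query : String := "select a from t union select b from t"

def Spec_break_down_query (sql : String) (out : List (String × Int)) : Prop := out = break_down_query_alt sql
instance (sql : String) (out : List (String × Int)) : Decidable (Spec_break_down_query sql out) := by unfold Spec_break_down_query; infer_instance

-- ===== CLAIM (what is proved, stated in full; the proofs are below) =====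
def Claim_equal_break_down_query : Prop := ∀ (sql : String), Dom_break_down_query sql → Pre_break_down_query sql → Spec_break_down_query sql (break_down_query sql)

-- ===== LEMMAS AND PROOFS =====

-- relative positions of the top-level keyword tokens (what A's phase 1 computes)
def pvSplits : List String → Int → List Int
  | [], _ => []
  | t :: r, d =>
    let d' := pvStep d t
    (if pvKw t && d' == 0 then [0] else []) ++ (pvSplits r d').map (· + 1)

-- final bracket depth of A's phase-1 fold
def pvDepth : List String → Int → Int
  | [], d => d
  | t :: r, d => pvDepth r (pvStep d t)

theorem pvPhase1_eq (toks : List String) : ∀ (s d : Int) (acc : List Int),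
    (PySem.List.enumerate toks s).foldl
      (fun (st : List Int × Int) (it : Int × String) =>
        let lb := pvStep st.2 it.2
        (if pvKw it.2 && lb == 0 then st.1 ++ [it.1] else st.1, lb)) (acc, d)
      = (acc ++ (pvSplits toks d).map (fun j => s + j), pvDepth toks d) := by
  induction toks with
  | nil => intro s d acc; simp [pvSplits, pvDepth, PySem.List.enumerate_nil]
  | cons t r ih =>
    intro s d acc
    rw [PySem.List.enumerate_cons]
    simp only [List.foldl_cons]
    rw [ih]
    simp only [pvSplits, pvDepth, List.map_append, List.map_map]
    have hc : ((fun j => s + j) ∘ fun x : Int => x + 1) = (fun j : Int => s + 1 + j) := by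
      funext x; simp [Function.comp]; ring
    by_cases h : pvKw t && pvStep d t == 0 <;> simp [h, hc]

theorem pvAltGo_acc (u : List String) : ∀ (sqls : List (String × Int)) buf cur d,
    pvAltGo u sqls buf cur d = sqls ++ pvAltGo u [] buf cur d := by
  induction u with
  | nil => intro sqls buf cur d; simp [pvAltGo]
  | cons t r ih =>
    intro sqls buf cur d
    simp only [pvAltGo]
    by_cases h : pvStep d t == 0 && pvKw t <;> simp only [h, if_pos, if_neg, Bool.not_eq_true]
    · rw [ih, ih ([] ++ _)]; simp
    · rw [ih]

theorem pvAltGo_nohit (u : List String) : ∀ (d : Int), pvSplits u d = [] →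
    ∀ sqls buf cur, pvAltGo u sqls buf cur d = sqls ++ [(PySem.Str.join " " (buf ++ u), cur)] := by
  induction u with
  | nil => intro d _ sqls buf cur; simp [pvAltGo]
  | cons t r ih =>
    intro d hs sqls buf cur
    simp only [pvSplits] at hs
    have h1 : ¬(pvKw t && pvStep d t == 0) = true := by
      intro h; simp [h] at hs
    have h2 : pvSplits r (pvStep d t) = [] := by
      rcases List.append_eq_nil_iff.mp hs with ⟨-, h⟩; exact List.map_eq_nil_iff.mp h
    simp only [pvAltGo]
    have h1' : ¬(pvStep d t == 0 && pvKw t) = true := by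
      intro h; exact h1 (by simpa [Bool.and_comm] using h)
    rw [if_neg h1']
    rw [ih _ h2]
    simp

theorem pvSplits_hit (u : List String) : ∀ (d : Int) (j : Int) (rest : List Int),
    pvSplits u d = j :: rest →
    ∃ pre t suf, u = pre ++ t :: suf ∧ (pre.length : Int) = j ∧
      rest = (pvSplits suf 0).map (· + (j + 1)) ∧
      pvTopKw u d = t :: pvTopKw suf 0 ∧
      ∀ sqls buf cur, pvAltGo u sqls buf cur d =
        pvAltGo suf (sqls ++ [(PySem.Str.join " " (buf ++ pre), cur)]) [] (pvQtype (PySem.Str.upper t)) 0 := by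
  induction u with
  | nil => intro d j rest h; simp [pvSplits] at h
  | cons t r ih =>
    intro d j rest h
    simp only [pvSplits] at h
    by_cases hh : (pvKw t && pvStep d t == 0) = true
    · -- hit at head
      have hd0 : pvStep d t = 0 := by
        have := (Bool.and_eq_true _ _).mp hh
        exact eq_of_beq this.2
      rw [if_pos hh] at h
      simp only [List.singleton_append, List.cons.injEq] at h
      refine ⟨[], t, r, by simp, by simpa using h.1, ?_, ?_, ?_⟩
      · rw [← h.2, ← h.1, hd0]; simp
      · simp only [pvTopKw, hh]; rw [hd0]; simp
      · intro sqls buf cur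
        simp only [pvAltGo]
        rw [if_pos (by simp [hd0, (Bool.and_eq_true _ _).mp hh |>.1])]
        rw [hd0]; simp
    · -- no hit at head
      rw [if_neg hh] at h
      simp only [List.nil_append] at h
      rcases List.map_eq_cons_iff.mp h with ⟨j', rest', hsp, hj, hrest⟩
      rcases ih (pvStep d t) j' rest' hsp with ⟨pre, tt, suf, hu, hlen, hrel, htop, hgo⟩
      refine ⟨t :: pre, tt, suf, by simp [hu], by simp [hlen, ← hj], ?_, ?_, ?_⟩
      · rw [← hrest, hrel, List.map_map]
        apply List.map_congr_left; intro x _; simp [Function.comp]; omega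
      · simp only [pvTopKw, hh]; simp [htop]
      · intro sqls buf cur
        simp only [pvAltGo]
        rw [if_neg (by intro hc; exact hh (by simpa [Bool.and_comm] using hc))]
        rw [hgo]; simp

-- the A-side phase-2 step function over a fixed token list
def pvG (toks : List String) (st : List (String × Int) × Int) (i : Int) : List (String × Int) × Int :=
  let ty := PySem.Str.upper (PySem.Str.strip ((PySem.List.pyGet? toks st.2).getD ""))
  let s := PySem.Str.join " " (PySem.List.slice toks (some (st.2 + 1)) (some i))
  (st.1 ++ [(s, pvQtype ty)], i)

theorem pvGet_mid (P u : List String) (t : String) :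
    (PySem.List.pyGet? (P ++ t :: u) (P.length : Int)).getD "" = t := by
  rw [PySem.List.pyGet?_natCast]
  simp

theorem pvSlice_mid (P pre suf : List String) (t : String) :
    PySem.List.slice (P ++ t :: (pre ++ suf)) (some ((P.length : Int) + 1))
      (some ((P.length : Int) + 1 + (pre.length : Int))) = pre := by
  have h1 : (P.length : Int) + 1 = ((P.length + 1 : Nat) : Int) := by push_cast; ring
  have h2 : (P.length : Int) + 1 + (pre.length : Int) = ((P.length + 1 + pre.length : Nat) : Int) := by
    push_cast; ring
  rw [h2, h1, PySem.List.slice_natCast]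
  have : (P ++ t :: (pre ++ suf)).drop (P.length + 1) = pre ++ suf := by
    rw [show P ++ t :: (pre ++ suf) = (P ++ [t]) ++ (pre ++ suf) by simp,
      show P.length + 1 = (P ++ [t]).length by simp, List.drop_left]
  rw [this]
  simp [List.take_left']

theorem pvSlice_end (P u : List String) (t : String) :
    PySem.List.slice (P ++ t :: u) (some ((P.length : Int) + 1))
      (some (((P ++ t :: u).length : Nat) : Int)) = u := by
  have h1 : (P.length : Int) + 1 = ((P.length + 1 : Nat) : Int) := by push_cast; ring
  rw [h1, PySem.List.slice_natCast]
  have : (P ++ t :: u).drop (P.length + 1) = u := by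
    rw [show P ++ t :: u = (P ++ [t]) ++ u by simp,
      show P.length + 1 = (P ++ [t]).length by simp, List.drop_left]
  rw [this]
  apply List.take_of_length_le
  simp; omega

theorem pvPhase2_eq (toks : List String) : ∀ (N : Nat) (u P : List String) (t : String)
    (cur : Int) (out : List (String × Int)),
    u.length ≤ N →
    toks = P ++ t :: u →
    pvQtype (PySem.Str.upper (PySem.Str.strip t)) = cur →
    (∀ x ∈ pvTopKw u 0, PySem.Str.strip x = x) →
    (((pvSplits u 0).map (fun k => (P.length : Int) + 1 + k) ++ [(toks.length : Int)]).foldl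
        (pvG toks) (out, (P.length : Int))).1
      = out ++ pvAltGo u [] [] cur 0 := by
  intro N
  induction N with
  | zero =>
    intro u P t cur out hN htoks hcur hstrip
    have hu : u = [] := List.eq_nil_of_length_eq_zero (Nat.le_zero.mp hN)
    subst hu
    simp only [pvSplits, List.map_nil, List.nil_append, List.foldl_cons, List.foldl_nil]
    simp only [pvG, htoks, pvGet_mid, pvSlice_end, hcur]
    rw [pvAltGo_nohit [] 0 rfl]
    simp
  | succ N ih =>
    intro u P t cur out hN htoks hcur hstrip
    cases hs : pvSplits u 0 with
    | nil =>
      simp only [List.map_nil, List.nil_append, List.foldl_cons, List.foldl_nil]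
      simp only [pvG, htoks, pvGet_mid, pvSlice_end, hcur]
      rw [pvAltGo_nohit u 0 hs]
      simp
    | cons j rest =>
      rcases pvSplits_hit u 0 j rest hs with ⟨pre, tt, suf, hu, hlen, hrest, htop, hgo⟩
      subst hu
      simp only [List.map_cons, List.cons_append, List.foldl_cons]
      have step1 : pvG toks (out, (P.length : Int)) ((P.length : Int) + 1 + j)
          = (out ++ [(PySem.Str.join " " pre, cur)], (P.length : Int) + 1 + j) := by
        simp only [pvG, htoks, pvGet_mid, hcur]
        rw [← hlen, pvSlice_mid]
      rw [step1]
      have hP' : (P.length : Int) + 1 + j = (((P ++ t :: pre).length : Nat) : Int) := by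
        simp [← hlen]; ring
      have hshift : rest.map (fun k => (P.length : Int) + 1 + k)
          = (pvSplits suf 0).map (fun k => (((P ++ t :: pre).length : Nat) : Int) + 1 + k) := by
        rw [hrest, List.map_map]
        apply List.map_congr_left; intro x _
        simp [Function.comp, ← hlen]; ring
      have htoks' : toks = (P ++ t :: pre) ++ tt :: suf := by
        rw [htoks]; simp
      have hstt : PySem.Str.strip tt = tt := hstrip tt (by rw [htop]; exact List.mem_cons_self)
      have hN' : suf.length ≤ N := by
        have := hN; simp [List.length_append] at this; omega
      have hstrip' : ∀ x ∈ pvTopKw suf 0, PySem.Str.strip x = x := by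
        intro x hx; exact hstrip x (by rw [htop]; exact List.mem_cons_of_mem _ hx)
      rw [hP', hshift]
      rw [ih suf (P ++ t :: pre) tt (pvQtype (PySem.Str.upper tt)) _ hN' htoks' (by rw [hstt]) hstrip']
      rw [hgo]
      simp only [List.nil_append]
      rw [pvAltGo_acc suf [(PySem.Str.join " " pre, cur)] [] (pvQtype (PySem.Str.upper tt)) 0]
      simp

theorem pvMain (toks : List String)
    (hpre : ∀ x ∈ pvTopKw toks 0,
      PySem.Str.strip x = x ∧
        PySem.Str.upper x ∈ (["INTERSECT", "UNION", "EXCEPT"] : List String)) :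
    (let p1 := (PySem.List.enumerate toks 0).foldl
      (fun (st : List Int × Int) (it : Int × String) =>
        let lb := pvStep st.2 it.2
        (if pvKw it.2 && lb == 0 then st.1 ++ [it.1] else st.1, lb)) ([], 0)
     let split_indice := p1.1 ++ [(toks.length : Int)]
     let start := (PySem.List.pyGet? split_indice 0).getD 0
     let main_sql := PySem.Str.join " " (PySem.List.slice toks none (some start))
     let p2 := (PySem.List.slice split_indice (some 1) none).foldl
       (fun (st : List (String × Int) × Int) (i : Int) =>
         let ty := PySem.Str.upper (PySem.Str.strip ((PySem.List.pyGet? toks st.2).getD ""))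
         let s := PySem.Str.join " " (PySem.List.slice toks (some (st.2 + 1)) (some i))
         (st.1 ++ [(s, pvQtype ty)], i)) ([(main_sql, (0 : Int))], start)
     p2.1) = pvAltGo toks [] [] 0 0 := by
  dsimp only
  rw [pvPhase1_eq]
  have hid : (pvSplits toks 0).map (fun j => (0 : Int) + j) = pvSplits toks 0 := by simp
  rw [hid]
  simp only [List.nil_append]
  cases hs : pvSplits toks 0 with
  | nil =>
    simp only [List.nil_append]
    rw [show PySem.List.slice [(toks.length : Int)] (some 1) none = [] by
      have := PySem.List.slice_from ([(toks.length : Int)]) (a := 1) (by norm_num)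
      rw [this]; rfl]
    simp only [List.foldl_nil]
    rw [show (PySem.List.pyGet? [(toks.length : Int)] 0).getD 0 = (toks.length : Int) by
      simp [PySem.List.pyGet?, PySem.List.pyIdx?]]
    rw [show PySem.List.slice toks none (some ((toks.length : Nat) : Int)) = toks by
      rw [PySem.List.slice_to_natCast]; simp]
    rw [pvAltGo_nohit toks 0 hs]
    simp
  | cons j rest =>
    rcases pvSplits_hit toks 0 j rest hs with ⟨pre, t, suf, hu, hlen, hrest, htop, hgo⟩
    rw [show (PySem.List.pyGet? ((j :: rest) ++ [(toks.length : Int)]) 0).getD 0 = j by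
      have h0 : (0:Int) ≤ (rest.length:Int) + 1 := by positivity
      simp [PySem.List.pyGet?, PySem.List.pyIdx?, h0]]
    rw [show PySem.List.slice ((j :: rest) ++ [(toks.length : Int)]) (some 1) none
        = rest ++ [(toks.length : Int)] by
      have := PySem.List.slice_from ((j :: rest) ++ [(toks.length : Int)]) (a := 1) (by norm_num)
      rw [this]; rfl]
    rw [show PySem.List.slice toks none (some j) = pre by
      rw [← hlen, PySem.List.slice_to_natCast, hu]
      simp [List.take_left']]
    have hst : PySem.Str.strip t = t :=
      (hpre t (by rw [htop]; exact List.mem_cons_self)).1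
    have hstrip' : ∀ x ∈ pvTopKw suf 0, PySem.Str.strip x = x := by
      intro x hx
      exact (hpre x (by rw [htop]; exact List.mem_cons_of_mem _ hx)).1
    have hshift : rest = (pvSplits suf 0).map (fun k => ((pre.length : Nat) : Int) + 1 + k) := by
      rw [hrest]
      apply List.map_congr_left; intro x _
      rw [← hlen]; ring
    have hfold := pvPhase2_eq toks suf.length suf pre t (pvQtype (PySem.Str.upper t))
      [(PySem.Str.join " " pre, (0 : Int))] le_rfl hu (by rw [hst]) hstrip'
    have hfold' : ((rest ++ [(toks.length : Int)]).foldl (pvG toks)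
        ([(PySem.Str.join " " pre, (0 : Int))], j)).1
        = [(PySem.Str.join " " pre, (0 : Int))] ++ pvAltGo suf [] [] (pvQtype (PySem.Str.upper t)) 0 := by
      rw [hshift, ← hlen]
      exact hfold
    rw [show (fun (st : List (String × Int) × Int) (i : Int) =>
        (st.1 ++ [(PySem.Str.join " " (PySem.List.slice toks (some (st.2 + 1)) (some i)),
          pvQtype (PySem.Str.upper (PySem.Str.strip ((PySem.List.pyGet? toks st.2).getD ""))))], i))
        = pvG toks from rfl]
    rw [hfold']
    rw [hgo]
    simp only [List.nil_append]
    rw [pvAltGo_acc suf [(PySem.Str.join " " pre, (0 : Int))] [] (pvQtype (PySem.Str.upper t)) 0]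

-- ===== VERDICT (by name: the statement is the Claim_ definition above) =====
theorem break_down_query_spec : Claim_equal_break_down_query := by
  unfold Claim_equal_break_down_query
  intro sql _ hpre
  unfold Spec_break_down_query break_down_query break_down_query_alt
  exact pvMain (PySem.Str.split₀ (PySem.Str.stripChars sql ";")) hpre
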